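-- pv_equiv track=rewrite | github.com/ralskwo/CodingTest | BAEKJOON/이분 탐색/입국심사/입국심사.py | minimum_time_to_finish
-- ===== SOURCE A (Python) =====
-- def minimum_time_to_finish(n, m, times):
--     # 초기 최소 시간과 최대 시간을 설정
--     left = 1
--     right = max(times) * m
--     answer = right
--
--     # 이분 탐색을 통해 최소 시간을 찾음
--     while left <= right:
--         mid = (left + right) // 2
--         total = 0
--
--         # 현재 중간 시간(mid) 내에 모든 친구들이 심사를 받을 수 있는지 계산
--         for time in times:
--             total += mid // time
--
--         # 총 심사받은 친구 수가 m 이상이면 시간 줄이기 시도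
--         if total >= m:
--             answer = mid
--             right = mid - 1
--         # 총 심사받은 친구 수가 m보다 적으면 시간 늘리기 시도
--         else:
--             left = mid + 1
--
--     return answer
-- ===== SOURCE B (Python) =====
-- def minimum_time_to_finish(n, m, times):
--     weight = {}
--     for t in times:
--         weight[t] = weight.get(t, 0) + 1
--     horizon = max(times) * m
--
--     def served(x):
--         return sum(c * (x // t) for t, c in weight.items())
--
--     def solve(lo, hi):
--         # first probe on the bisection path whose served count reaches m, else None
--         if lo > hi:
--             return None
--         mid = lo + (hi - lo) // 2
--         if served(mid) < m:
--             return solve(mid + 1, hi)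
--         first = solve(lo, mid - 1)
--         return mid if first is None else first
--
--     best = solve(1, horizon)
--     return horizon if best is None else best
-- ===== Notes on version B (the rewrite author's own statement) =====
-- stated objective: alternative
-- what changed: A's mutable left/right/answer while-loop scanning the whole times list on every probe is replaced by a multiplicity dict built once (each probe sums count*(x//t) over distinct times only), a recursive Option-returning solve with no answer accumulator, and the overflow-safe midpoint lo+(hi-lo)//2; the probe schedule is kept so the two agree exactly even on non-monotone (mixed-sign) inputs.
import Mathlib
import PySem

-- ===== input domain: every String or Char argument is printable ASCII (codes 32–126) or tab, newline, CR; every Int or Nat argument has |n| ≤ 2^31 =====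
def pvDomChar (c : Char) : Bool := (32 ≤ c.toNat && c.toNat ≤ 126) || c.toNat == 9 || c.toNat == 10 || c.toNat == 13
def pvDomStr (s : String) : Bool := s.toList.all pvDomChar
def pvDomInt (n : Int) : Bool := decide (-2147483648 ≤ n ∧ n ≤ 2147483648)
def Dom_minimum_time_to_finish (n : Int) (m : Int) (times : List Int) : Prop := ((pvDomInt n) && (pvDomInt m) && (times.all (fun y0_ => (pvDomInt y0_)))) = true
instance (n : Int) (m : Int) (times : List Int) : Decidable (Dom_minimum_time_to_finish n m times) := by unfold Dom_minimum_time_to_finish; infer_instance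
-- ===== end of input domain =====

-- B keeps A's probe schedule (required for exact agreement on inputs where the probe count
-- is not monotone) but builds a multiplicity dict once so each probe sums over distinct
-- times, replaces the mutable left/right/answer loop by a recursive Option-returning solve,
-- and uses the overflow-safe midpoint lo + (hi-lo)//2; objective: alternative.


-- ===== PORT A =====
-- the for-loop accumulating total += mid // time
def pvTotalA (mid : Int) (times : List Int) : Int :=
  times.foldl (fun total time => total + PySem.Int.floordiv mid time) 0

-- the while-loop over the mutable state (left, right, answer); fuel = interval length + 1
-- is a totality guard only (each iteration shrinks the interval, so fuel never runs out)
def pvLoopA (m : Int) (times : List Int) (fuel : Nat) (left right answer : Int) : Int :=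
  match fuel with
  | 0 => answer
  | fuel + 1 =>
    if left ≤ right then
      let mid := PySem.Int.floordiv (left + right) 2
      if pvTotalA mid times ≥ m then
        pvLoopA m times fuel left (mid - 1) mid
      else
        pvLoopA m times fuel (mid + 1) right answer
    else answer

def minimum_time_to_finish (n : Int) (m : Int) (times : List Int) : Int :=
  match PySem.List.max? times (fun y => y) with
  | none => 0   -- Python raises ValueError on max([]); excluded by Pre_
  | some mx => pvLoopA m times ((mx * m).toNat + 1) 1 (mx * m) (mx * m)

-- ===== PORT B =====
-- the weight dict: weight[t] = weight.get(t, 0) + 1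
def pvWeightB (times : List Int) : PySem.Dict Int Int :=
  times.foldl (fun w t => w.insert t (w.getD t 0 + 1)) PySem.Dict.empty

-- served(x) = sum(c * (x // t) for t, c in weight.items())
def pvServedB (w : PySem.Dict Int Int) (x : Int) : Int :=
  (w.items.map (fun p => p.2 * PySem.Int.floordiv x p.1)).sum

-- solve(lo, hi): first probe on the bisection path with served ≥ m, else None
-- (fuel = interval length + 1 is a totality guard only)
def pvSolveB (m : Int) (w : PySem.Dict Int Int) (fuel : Nat) (lo hi : Int) : Option Int :=
  match fuel with
  | 0 => none
  | fuel + 1 =>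
    if lo > hi then none
    else
      let mid := lo + PySem.Int.floordiv (hi - lo) 2
      if pvServedB w mid < m then
        pvSolveB m w fuel (mid + 1) hi
      else
        match pvSolveB m w fuel lo (mid - 1) with
        | none => some mid
        | some first => some first

def minimum_time_to_finish_alt (n : Int) (m : Int) (times : List Int) : Int :=
  let w := pvWeightB times
  match PySem.List.max? times (fun y => y) with
  | none => 0   -- max([]) raises in Python B too; excluded by Pre_
  | some mx =>
    let horizon := mx * m
    match pvSolveB m w (horizon.toNat + 1) 1 horizon with
    | none => horizon
    | some best => best

-- ===== PRECONDITION & SPEC =====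
-- Pre_ excludes exactly the inputs where the Pythons raise: empty times (ValueError on max)
-- and a zero in times when the search loop runs, i.e. 1 ≤ max(times)*m (ZeroDivisionError).
def Pre_minimum_time_to_finish (n : Int) (m : Int) (times : List Int) : Prop :=
  times ≠ [] ∧ ((0 : Int) ∈ times → (PySem.List.max? times (fun y => y)).getD 0 * m < 1)
instance (n : Int) (m : Int) (times : List Int) : Decidable (Pre_minimum_time_to_finish n m times) := by unfold Pre_minimum_time_to_finish; infer_instance

def pvWitness_minimum_time_to_finish : Int × Int × List Int := (2, 3, [2, 1])

def Spec_minimum_time_to_finish (n : Int) (m : Int) (times : List Int) (out : Int) : Prop := out = minimum_time_to_finish_alt n m times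
instance (n : Int) (m : Int) (times : List Int) (out : Int) : Decidable (Spec_minimum_time_to_finish n m times out) := by unfold Spec_minimum_time_to_finish; infer_instance

-- ===== CLAIM (what is proved, stated in full; the proofs are below) =====
def Claim_equal_minimum_time_to_finish : Prop := ∀ (n : Int) (m : Int) (times : List Int), Dom_minimum_time_to_finish n m times → Pre_minimum_time_to_finish n m times → Spec_minimum_time_to_finish n m times (minimum_time_to_finish n m times)

-- ===== LEMMAS AND PROOFS =====

-- the weighted sum over the dict's distinct keys equals A's scan over the whole list
theorem pvServed_eq_total (times : List Int) (x : Int) :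
    pvServedB (pvWeightB times) x = pvTotalA x times := by
  unfold pvServedB pvWeightB pvTotalA
  rw [PySem.Dict.foldl_insert_getD_add_one_eq_counter, PySem.Dict.items_counter,
      PySem.List.foldl_add, List.map_map]
  have hnd : (PySem.Set.ofList times).Nodup := PySem.Set.nodup_ofList times
  have hfin : (PySem.Set.ofList times).toFinset = times.toFinset := by
    ext a
    simp [List.mem_toFinset, PySem.Set.mem_ofList]
  rw [← List.sum_toFinset _ hnd, hfin, Finset.sum_list_map_count]
  rw [zero_add]
  refine Finset.sum_congr rfl (fun a _ => ?_)
  simp [Function.comp, nsmul_eq_mul]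

-- both programs probe the same midpoint
theorem pvMid_eq (lo hi : Int) :
    lo + PySem.Int.floordiv (hi - lo) 2 = PySem.Int.floordiv (lo + hi) 2 := by
  rw [PySem.Int.floordiv_eq_ediv_of_pos (by norm_num), PySem.Int.floordiv_eq_ediv_of_pos (by norm_num)]
  omega

-- A's loop is B's recursion with the pending answer as the default
theorem pvLoop_eq_solve (m : Int) (times : List Int) (fuel : Nat) :
    ∀ (l r a : Int),
    pvLoopA m times fuel l r a = (pvSolveB m (pvWeightB times) fuel l r).getD a := by
  induction fuel with
  | zero => intro l r a; rfl
  | succ fuel ih =>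
    intro l r a
    rw [pvLoopA, pvSolveB]
    by_cases h : l ≤ r
    · rw [if_pos h, if_neg (by omega : ¬ l > r)]
      simp only [pvMid_eq, pvServed_eq_total]
      by_cases h2 : pvTotalA (PySem.Int.floordiv (l + r) 2) times ≥ m
      · rw [if_pos h2, if_neg (by omega : ¬ pvTotalA (PySem.Int.floordiv (l + r) 2) times < m)]
        rw [ih]
        cases pvSolveB m (pvWeightB times) fuel l (PySem.Int.floordiv (l + r) 2 - 1) <;> rfl
      · rw [if_neg h2, if_pos (by omega : pvTotalA (PySem.Int.floordiv (l + r) 2) times < m)]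
        exact ih _ _ _
    · rw [if_neg h, if_pos (by omega : l > r)]
      rfl

-- ===== VERDICT (by name: the statement is the Claim_ definition above) =====
theorem minimum_time_to_finish_spec : Claim_equal_minimum_time_to_finish := by
  intro n m times _ _
  unfold Spec_minimum_time_to_finish minimum_time_to_finish minimum_time_to_finish_alt
  cases hmx : PySem.List.max? times (fun y => y) with
  | none => rfl
  | some mx =>
    simp only [pvLoop_eq_solve]
    cases pvSolveB m (pvWeightB times) ((mx * m).toNat + 1) 1 (mx * m) <;> rfl
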